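-- pv_equiv track=rewrite | github.com/ELBATTU/LenguajeFormal | Calculadora Lenguaje Formal.py | m_Esima_Repeticion
-- ===== SOURCE A (Python) =====
-- def Copiar_Leguaje(L1):
--     L2 = []
--     for i in range(len(L1)):
--         if(L1[i] != -1):
--             L2.append(L1[i])
--     return L2
--
-- def Eliminar_Repetidos(L1):
--     rang = len(L1)
--     for i in range(0,rang):
--         for j in range(0,rang):
--             if(i != j):
--                 if(L1[i] == L1[j]):
--                     L1[j] = -1
--     L2 = Copiar_Leguaje(L1)
--     L1 = L2
--     return L1
--
-- def m_Esima_Repeticion(L1,rep):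
--     L2=[]
--     for i in range(len(L1)):
--         x = rep
--         Aux = L1[i]
--         while(x>1):
--             Aux += L1[i]
--             x-=1
--         L2.append(Aux)
--     return Eliminar_Repetidos(L2)
-- ===== SOURCE B (Python) =====
-- def m_Esima_Repeticion(L1, rep):
--     mult = rep if rep > 1 else 1
--     out = []
--     seen = set()
--     for x in L1:
--         y = x * mult
--         if y not in seen:
--             seen.add(y)
--             out.append(y)
--     return out
-- ===== Notes on version B (the rewrite author's own statement) =====
-- stated objective: faster
-- what changed: Replaced the repeated-addition while loop by a closed-form string multiplication and the O(n^2) sentinel-marking dedup pass by a single pass with a seen-set keeping first occurrences.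
import Mathlib
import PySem

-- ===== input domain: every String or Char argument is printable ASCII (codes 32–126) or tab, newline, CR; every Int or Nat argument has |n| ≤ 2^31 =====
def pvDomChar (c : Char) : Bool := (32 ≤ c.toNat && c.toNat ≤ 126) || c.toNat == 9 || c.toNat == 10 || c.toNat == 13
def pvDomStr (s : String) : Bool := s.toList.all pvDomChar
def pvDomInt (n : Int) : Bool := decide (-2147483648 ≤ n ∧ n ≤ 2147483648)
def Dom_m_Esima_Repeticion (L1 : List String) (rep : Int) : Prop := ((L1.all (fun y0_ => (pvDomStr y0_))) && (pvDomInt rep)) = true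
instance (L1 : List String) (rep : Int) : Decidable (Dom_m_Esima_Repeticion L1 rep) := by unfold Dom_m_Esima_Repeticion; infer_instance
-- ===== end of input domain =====

-- B replaces the repeated-addition while loop by a closed-form string repetition and the
-- O(n^2) sentinel(-1)-marking dedup by a single pass with a seen-set (first occurrences kept).

-- ===== PORT A =====
-- 'while(x>1): Aux += L1[i]; x -= 1'
def pyWhileRep (s Aux : String) (x : Int) : String :=
  if h : x > 1 then pyWhileRep s (Aux ++ s) (x - 1) else Aux
termination_by x.toNat
decreasing_by omega

-- entries are Option String: 'none' models the sentinel -1 (string == -1 is False, -1 == -1 is True,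
-- exactly Option's equality between some/none); exact for the string elements admitted here
def Copiar_Leguaje (L1 : List (Option String)) : List String :=
  L1.foldl (fun L2 o => match o with | some s => L2 ++ [s] | none => L2) []

def elimStep (i : Nat) (st : List (Option String)) (j : Nat) : List (Option String) :=
  if i ≠ j then
    if st.getD i none = st.getD j none then st.set j none else st
  else st

def Eliminar_Repetidos (L1 : List (Option String)) : List String :=
  let rang := L1.length
  let L1' := (List.range rang).foldl (fun st i => (List.range rang).foldl (elimStep i) st) L1
  Copiar_Leguaje L1'

def m_Esima_Repeticion (L1 : List String) (rep : Int) : List String :=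
  let L2 := L1.foldl (fun L2 s => L2 ++ [some (pyWhileRep s s rep)]) ([] : List (Option String))
  Eliminar_Repetidos L2

-- ===== PORT B =====
-- hand port of Python's 'x * mult' for a string and an int: x repeated mult times, "" for mult ≤ 0 (exact)
def strMulN (s : String) : Nat → String
  | 0 => ""
  | n + 1 => s ++ strMulN s n

def strMul (s : String) (m : Int) : String := strMulN s m.toNat

def m_Esima_Repeticion_alt (L1 : List String) (rep : Int) : List String :=
  let mult : Int := if rep > 1 then rep else 1
  (L1.foldl
    (fun (acc : List String × PySem.Set String) x =>
      let y := strMul x mult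
      if PySem.Set.contains acc.2 y then acc
      else (acc.1 ++ [y], PySem.Set.add acc.2 y))
    (([] : List String), (PySem.Set.empty : PySem.Set String))).1

-- ===== PRECONDITION & SPEC =====
def Spec_m_Esima_Repeticion (L1 : List String) (rep : Int) (out : List String) : Prop := out = m_Esima_Repeticion_alt L1 rep
instance (L1 : List String) (rep : Int) (out : List String) : Decidable (Spec_m_Esima_Repeticion L1 rep out) := by unfold Spec_m_Esima_Repeticion; infer_instance

-- ===== CLAIM (what is proved, stated in full; the proofs are below) =====
def Claim_equal_m_Esima_Repeticion : Prop := ∀ (L1 : List String) (rep : Int), Dom_m_Esima_Repeticion L1 rep → Spec_m_Esima_Repeticion L1 rep (m_Esima_Repeticion L1 rep)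

-- ===== LEMMAS AND PROOFS =====

-- the while loop is string repetition
theorem pyWhileRep_eq (n : Nat) : ∀ (s Aux : String) (x : Int), (x - 1).toNat = n →
    pyWhileRep s Aux x = Aux ++ strMulN s n := by
  induction n with
  | zero =>
    intro s Aux x h
    rw [pyWhileRep, dif_neg (by omega)]
    simp [strMulN, String.append_empty]
  | succ n ih =>
    intro s Aux x h
    rw [pyWhileRep, dif_pos (by omega), ih s (Aux ++ s) (x - 1) (by omega)]
    simp [strMulN, String.append_assoc]

theorem whileRep_strMul (s : String) (rep : Int) :
    pyWhileRep s s rep = strMul s (if rep > 1 then rep else 1) := by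
  rw [pyWhileRep_eq ((rep - 1).toNat) s s rep rfl]
  unfold strMul
  by_cases h : rep > 1
  · rw [if_pos h, show rep.toNat = (rep - 1).toNat + 1 from by omega]
    simp [strMulN]
  · rw [if_neg h, show (rep - 1).toNat = 0 from by omega]
    simp [strMulN, String.append_empty]

-- A's builder loop is a map
theorem foldl_push {α β : Type} (l : List α) (g : α → β) (init : List β) :
    l.foldl (fun acc x => acc ++ [g x]) init = init ++ l.map g := by
  induction l generalizing init with
  | nil => simp
  | cons a t ih => simp [List.foldl, ih]

-- Copiar_Leguaje is filterMap id
theorem copiar_eq (L : List (Option String)) (init : List String) :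
    L.foldl (fun L2 o => match o with | some s => L2 ++ [s] | none => L2) init
      = init ++ L.filterMap id := by
  induction L generalizing init with
  | nil => simp
  | cons o t ih => cases o <;> simp [List.foldl, ih]

theorem getD_set (l : List (Option String)) (m : Nat) (v : Option String) (j : Nat) :
    (l.set m v).getD j none = if j = m ∧ m < l.length then v else l.getD j none := by
  simp only [List.getD_eq_getElem?_getD, List.getElem?_set]
  by_cases h1 : j = m
  · subst h1
    by_cases h2 : j < l.length
    · simp [h2]
    · simp [h2]
  · rw [if_neg (show ¬ m = j from fun h => h1 h.symm)]
    simp [h1]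

theorem elimStep_length (i : Nat) (st : List (Option String)) (j : Nat) :
    (elimStep i st j).length = st.length := by
  unfold elimStep; split_ifs <;> simp

theorem elim_length (i : Nat) (st : List (Option String)) (p : Nat) :
    ((List.range p).foldl (elimStep i) st).length = st.length := by
  induction p with
  | zero => simp
  | succ p ih => rw [List.range_succ, List.foldl_append]; simp [elimStep_length, ih]

theorem getD_none_of_ge (l : List (Option String)) (j : Nat) (h : l.length ≤ j) :
    l.getD j none = none := by
  simp [List.getD_eq_getElem?_getD, List.getElem?_eq_none h]

-- the inner index loop marks every j ≠ i whose current entry equals entry i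
theorem inner_getD (i : Nat) (st : List (Option String)) (p : Nat) (j : Nat) :
    ((List.range p).foldl (elimStep i) st).getD j none =
      if j < p ∧ j ≠ i ∧ st.getD i none = st.getD j none then none else st.getD j none := by
  induction p generalizing j with
  | zero => simp
  | succ p ih =>
    rw [List.range_succ, List.foldl_append, List.foldl_cons, List.foldl_nil]
    have hii : ((List.range p).foldl (elimStep i) st).getD i none = st.getD i none := by
      rw [ih i]; simp
    have hpp : ((List.range p).foldl (elimStep i) st).getD p none = st.getD p none := by
      rw [ih p]; simp
    have hlen : ((List.range p).foldl (elimStep i) st).length = st.length := elim_length i st p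
    rw [elimStep]
    by_cases hip : i ≠ p
    · rw [if_pos hip, hii, hpp]
      by_cases hE : st.getD i none = st.getD p none
      · rw [if_pos hE, getD_set, hlen, ih j]
        by_cases hjp : j = p
        · by_cases hl : p < st.length
          · rw [if_pos (show j = p ∧ p < st.length from ⟨hjp, hl⟩),
                if_pos (show j < p + 1 ∧ j ≠ i ∧ st.getD i none = st.getD j none from
                  ⟨by omega, by rw [hjp]; exact fun h => hip h.symm, by rw [hjp]; exact hE⟩)]
          · rw [if_neg (show ¬ (j = p ∧ p < st.length) from fun h => hl h.2),
                if_neg (show ¬ (j < p ∧ j ≠ i ∧ st.getD i none = st.getD j none) from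
                  fun h => by omega),
                if_pos (show j < p + 1 ∧ j ≠ i ∧ st.getD i none = st.getD j none from
                  ⟨by omega, by rw [hjp]; exact fun h => hip h.symm, by rw [hjp]; exact hE⟩),
                getD_none_of_ge st j (by omega)]
        · rw [if_neg (show ¬ (j = p ∧ p < st.length) from fun h => hjp h.1)]
          have heq : (j < p ∧ j ≠ i ∧ st.getD i none = st.getD j none)
               ↔ (j < p + 1 ∧ j ≠ i ∧ st.getD i none = st.getD j none) := by
            constructor
            · rintro ⟨a, b, c⟩; exact ⟨by omega, b, c⟩
            · rintro ⟨a, b, c⟩; exact ⟨by omega, b, c⟩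
          rw [if_congr heq rfl rfl]
      · rw [if_neg hE, ih j]
        by_cases hjp : j = p
        · rw [if_neg (show ¬ (j < p ∧ j ≠ i ∧ st.getD i none = st.getD j none) from fun h => by omega),
              if_neg (show ¬ (j < p + 1 ∧ j ≠ i ∧ st.getD i none = st.getD j none) from
                fun h => hE (by rw [← hjp]; exact h.2.2))]
        · have heq : (j < p ∧ j ≠ i ∧ st.getD i none = st.getD j none)
               ↔ (j < p + 1 ∧ j ≠ i ∧ st.getD i none = st.getD j none) := by
            constructor
            · rintro ⟨a, b, c⟩; exact ⟨by omega, b, c⟩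
            · rintro ⟨a, b, c⟩
              exact ⟨by omega, b, c⟩
          rw [if_congr heq rfl rfl]
    · rw [if_neg hip, ih j]
      have hip' : i = p := by omega
      have heq : (j < p ∧ j ≠ i ∧ st.getD i none = st.getD j none)
           ↔ (j < p + 1 ∧ j ≠ i ∧ st.getD i none = st.getD j none) := by
        constructor
        · rintro ⟨a, b, c⟩; exact ⟨by omega, b, c⟩
        · rintro ⟨a, b, c⟩
          have : j ≠ p := fun h => b (by rw [hip']; exact h)
          exact ⟨by omega, b, c⟩
      rw [if_congr heq rfl rfl]

def outerF (S : List String) (m : Nat) : List (Option String) :=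
  (List.range m).foldl (fun st i => (List.range S.length).foldl (elimStep i) st) (S.map some)

theorem outer_length (S : List String) (m : Nat) : (outerF S m).length = S.length := by
  induction m with
  | zero => simp [outerF]
  | succ m ih =>
    unfold outerF at *
    rw [List.range_succ, List.foldl_append, List.foldl_cons, List.foldl_nil, elim_length, ih]

theorem map_some_getD (S : List String) (j : Nat) : (S.map some).getD j none = S[j]? := by
  simp only [List.getD_eq_getElem?_getD, List.getElem?_map]
  cases S[j]? <;> rfl

-- after m outer passes, entry j is erased iff an equal entry occurs before j and before pass m
theorem outer_getD (S : List String) (m : Nat) : ∀ (j : Nat),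
    (outerF S m).getD j none =
      if ∃ k, k < j ∧ k < m ∧ S[k]? = S[j]? then none else S[j]? := by
  induction m with
  | zero =>
    intro j
    rw [if_neg (show ¬ ∃ k, k < j ∧ k < 0 ∧ S[k]? = S[j]? from by rintro ⟨k, -, hk, -⟩; omega)]
    unfold outerF
    rw [List.range_zero, List.foldl_nil]
    exact map_some_getD S j
  | succ m ih =>
    intro j
    have hstep : outerF S (m + 1) = (List.range S.length).foldl (elimStep m) (outerF S m) := by
      unfold outerF
      rw [List.range_succ, List.foldl_append, List.foldl_cons, List.foldl_nil]
    rw [hstep, inner_getD]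
    by_cases hAj : ∃ k, k < j ∧ k < m ∧ S[k]? = S[j]?
    · have hvj : (outerF S m).getD j none = none := by rw [ih j, if_pos hAj]
      rw [hvj]
      rw [if_pos (show ∃ k, k < j ∧ k < m + 1 ∧ S[k]? = S[j]? from by
        obtain ⟨k, a, b, c⟩ := hAj; exact ⟨k, a, by omega, c⟩)]
      split <;> rfl
    · have hvj : (outerF S m).getD j none = S[j]? := by rw [ih j, if_neg hAj]
      by_cases hAm : ∃ k, k < m ∧ k < m ∧ S[k]? = S[m]?
      · have hvm : (outerF S m).getD m none = none := by rw [ih m, if_pos hAm]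
        rw [hvj, hvm]
        rw [if_neg (show ¬ (j < S.length ∧ j ≠ m ∧ none = S[j]?) from by
          rintro ⟨hjl, -, hc⟩
          have := List.getElem?_eq_none_iff.mp hc.symm
          omega)]
        rw [if_neg (show ¬ ∃ k, k < j ∧ k < m + 1 ∧ S[k]? = S[j]? from by
          rintro ⟨k, a, b, c⟩
          by_cases hkm : k < m
          · exact hAj ⟨k, a, hkm, c⟩
          · have hk : k = m := by omega
            subst hk
            obtain ⟨k', a', -, c'⟩ := hAm
            exact hAj ⟨k', by omega, by omega, c'.trans c⟩)]
      · have hvm : (outerF S m).getD m none = S[m]? := by rw [ih m, if_neg hAm]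
        rw [hvj, hvm]
        by_cases hc : j < S.length ∧ j ≠ m ∧ S[m]? = S[j]?
        · rw [if_pos hc]
          have hmj : m < j := by
            rcases Nat.lt_or_ge m j with h | h
            · exact h
            · have hjm : j < m := by
                rcases Nat.lt_or_ge j m with h' | h'
                · exact h'
                · exact absurd (by omega : j = m) hc.2.1
              exact absurd ⟨j, hjm, hjm, hc.2.2.symm⟩ hAm
          rw [if_pos (show ∃ k, k < j ∧ k < m + 1 ∧ S[k]? = S[j]? from ⟨m, hmj, by omega, hc.2.2⟩)]
        · rw [if_neg hc]
          by_cases hjl : j < S.length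
          · rw [if_neg (show ¬ ∃ k, k < j ∧ k < m + 1 ∧ S[k]? = S[j]? from by
              rintro ⟨k, a, b, c⟩
              by_cases hkm : k < m
              · exact hAj ⟨k, a, hkm, c⟩
              · have hk : k = m := by omega
                subst hk
                exact hc ⟨hjl, by omega, c⟩)]
          · have hn : S[j]? = none := List.getElem?_eq_none (Nat.le_of_not_lt hjl)
            rw [hn]
            split <;> rfl

def dedupMark (S : List String) : List (Option String) :=
  (List.range S.length).map (fun j => if ∃ k, k < j ∧ S[k]? = S[j]? then none else S[j]?)

theorem outer_eq_dedupMark (S : List String) : outerF S S.length = dedupMark S := by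
  apply List.ext_getElem?
  intro j
  by_cases hj : j < S.length
  · have h1 : (outerF S S.length)[j]? = some ((outerF S S.length).getD j none) := by
      rw [List.getD_eq_getElem?_getD, List.getElem?_eq_getElem (by rw [outer_length]; exact hj)]
      rfl
    have h2 : (dedupMark S)[j]? = some (if ∃ k, k < j ∧ S[k]? = S[j]? then none else S[j]?) := by
      simp [dedupMark, List.getElem?_range hj]
    rw [h1, h2, outer_getD]
    have : (∃ k, k < j ∧ k < S.length ∧ S[k]? = S[j]?) ↔ (∃ k, k < j ∧ S[k]? = S[j]?) := by
      constructor
      · rintro ⟨k, a, -, c⟩; exact ⟨k, a, c⟩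
      · rintro ⟨k, a, c⟩; exact ⟨k, a, by omega, c⟩
    rw [if_congr this rfl rfl]
  · rw [List.getElem?_eq_none (by rw [outer_length]; omega),
        List.getElem?_eq_none (by simp [dedupMark]; omega)]

theorem dedupMark_append (S : List String) (s : String) :
    dedupMark (S ++ [s]) = dedupMark S ++ [if s ∈ S then none else some s] := by
  unfold dedupMark
  rw [List.length_append, List.length_singleton, List.range_succ, List.map_append]
  congr 1
  · apply List.map_congr_left
    intro j hj
    rw [List.mem_range] at hj
    have hgj : (S ++ [s])[j]? = S[j]? := List.getElem?_append_left hj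
    have : (∃ k, k < j ∧ (S ++ [s])[k]? = (S ++ [s])[j]?) ↔ (∃ k, k < j ∧ S[k]? = S[j]?) := by
      constructor
      · rintro ⟨k, a, c⟩
        exact ⟨k, a, by rwa [List.getElem?_append_left (by omega), hgj] at c⟩
      · rintro ⟨k, a, c⟩
        exact ⟨k, a, by rwa [List.getElem?_append_left (by omega), hgj]⟩
    rw [if_congr this rfl rfl, hgj]
  · have hs : (S ++ [s])[S.length]? = some s := by
      rw [List.getElem?_append_right (le_refl _)]
      simp
    have : (∃ k, k < S.length ∧ (S ++ [s])[k]? = (S ++ [s])[S.length]?) ↔ s ∈ S := by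
      rw [List.mem_iff_getElem?]
      constructor
      · rintro ⟨k, a, c⟩
        rw [List.getElem?_append_left a, hs] at c
        exact ⟨k, c⟩
      · rintro ⟨k, c⟩
        have hk : k < S.length := (List.getElem?_eq_some_iff.mp c).1
        exact ⟨k, hk, by rw [List.getElem?_append_left hk, hs]; exact c⟩
    simp only [List.map_cons, List.map_nil]
    rw [if_congr this rfl rfl, hs]

theorem filterMap_dedupMark (S : List String) :
    (dedupMark S).filterMap id = PySem.Set.ofList S := by
  induction S using List.reverseRecOn with
  | nil => rfl
  | append_singleton S s ih =>
    rw [dedupMark_append, List.filterMap_append, ih]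
    have hof : PySem.Set.ofList (S ++ [s]) = PySem.Set.add (PySem.Set.ofList S) s := by
      rw [PySem.Set.ofList_eq_foldl, PySem.Set.ofList_eq_foldl, List.foldl_append]
      rfl
    rw [hof]
    by_cases hm : s ∈ S
    · rw [if_pos hm]
      simp [PySem.Set.add, hm]
    · rw [if_neg hm]
      simp [PySem.Set.add, hm]

-- B's fold keeps out = seen; both are Set.ofList of the mapped list
theorem alt_pair (f : String → String) (l : List String) : ∀ (s0 : PySem.Set String),
    (l.foldl
      (fun (acc : List String × PySem.Set String) x =>
        if PySem.Set.contains acc.2 (f x) then acc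
        else (acc.1 ++ [f x], PySem.Set.add acc.2 (f x)))
      (s0, s0))
    = (l.foldl (fun t x => PySem.Set.add t (f x)) s0,
       l.foldl (fun t x => PySem.Set.add t (f x)) s0) := by
  induction l with
  | nil => intro s0; rfl
  | cons a t ih =>
    intro s0
    simp only [List.foldl_cons]
    by_cases h : f a ∈ s0
    · have hadd : PySem.Set.add s0 (f a) = s0 := by simp [PySem.Set.add, h]
      simpa [h, hadd] using ih s0
    · have hadd : PySem.Set.add s0 (f a) = s0 ++ [f a] := by simp [PySem.Set.add, h]
      simpa [h, hadd] using ih (s0 ++ [f a])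

theorem alt_eq (L1 : List String) (rep : Int) :
    m_Esima_Repeticion_alt L1 rep
      = PySem.Set.ofList (L1.map (fun s => strMul s (if rep > 1 then rep else 1))) := by
  rw [show m_Esima_Repeticion_alt L1 rep
      = (L1.foldl
          (fun (acc : List String × PySem.Set String) x =>
            if PySem.Set.contains acc.2 (strMul x (if rep > 1 then rep else 1)) then acc
            else (acc.1 ++ [strMul x (if rep > 1 then rep else 1)],
                  PySem.Set.add acc.2 (strMul x (if rep > 1 then rep else 1))))
          (([] : List String), ([] : PySem.Set String))).1 from rfl]
  rw [alt_pair (fun s => strMul s (if rep > 1 then rep else 1)) L1 ([] : PySem.Set String)]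
  rw [PySem.Set.ofList_eq_foldl, List.foldl_map]

-- ===== VERDICT (by name: the statement is the Claim_ definition above) =====
theorem m_Esima_Repeticion_spec : Claim_equal_m_Esima_Repeticion := by
  intro L1 rep _
  unfold Spec_m_Esima_Repeticion m_Esima_Repeticion
  rw [alt_eq]
  have hmap : L1.foldl (fun L2 s => L2 ++ [some (pyWhileRep s s rep)]) ([] : List (Option String))
      = (L1.map (fun s => strMul s (if rep > 1 then rep else 1))).map some := by
    rw [foldl_push, List.map_map]
    simp only [List.nil_append, Function.comp_def, whileRep_strMul]
  rw [hmap]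
  generalize L1.map (fun s => strMul s (if rep > 1 then rep else 1)) = S
  show Eliminar_Repetidos (S.map some) = _
  unfold Eliminar_Repetidos
  rw [List.length_map]
  show Copiar_Leguaje (outerF S S.length) = _
  unfold Copiar_Leguaje
  rw [copiar_eq, outer_eq_dedupMark, filterMap_dedupMark, List.nil_append]
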